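-- pv_equiv track=rewrite | github.com/PhanindraParashar/mini_projects | Prime_Numbers_RSA/RSA/RSA-300/rsa300_factorise.py | posible_x2_y2_k
-- ===== SOURCE A (Python) =====
-- def square_modulo_posible_list_k(n,k):
--     p = []
--     for i in range(n):
--         if k*i**2 % n not in p:
--             p.append(k*i**2 % n)
--     p.sort()
--     return p
--
-- def posible_x2_y2_k(mod_num,r,k):
--     L = square_modulo_posible_list_k(mod_num,k)
--     x2 = []
--     y2 = []
--     for i in L:
--         for j in L:
--             if i > j:
--                 if i - j == r:
--                     x2.append(i)
--                     y2.append(j)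
--             else:
--                 if mod_num + i - j == r:
--                     x2.append(i)
--                     y2.append(j)
--     return x2,y2 # posible val of x^2 % mod_num and y^2 % mod_num
-- ===== SOURCE B (Python) =====
-- def posible_x2_y2_k(mod_num, r, k):
--     # residues of k*x^2 mod mod_num, as a set for O(1) lookup
--     residues = set()
--     for i in range(mod_num):
--         residues.add(k * i * i % mod_num)
--     x2 = []
--     y2 = []
--     for i in sorted(residues):
--         j = i - r
--         if j in residues and j < i:
--             x2.append(i)
--             y2.append(j)
--         j = mod_num + i - r
--         if j in residues and i <= j:
--             x2.append(i)
--             y2.append(j)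
--     return x2, y2
-- ===== Notes on version B (the rewrite author's own statement) =====
-- stated objective: faster
-- what changed: Replaces the O(n^2) double loop over the residue list by a set of residues and, for each residue i, direct lookups of the two possible partners j = i-r and j = mod_num+i-r, removing the inner scan.
import Mathlib
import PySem

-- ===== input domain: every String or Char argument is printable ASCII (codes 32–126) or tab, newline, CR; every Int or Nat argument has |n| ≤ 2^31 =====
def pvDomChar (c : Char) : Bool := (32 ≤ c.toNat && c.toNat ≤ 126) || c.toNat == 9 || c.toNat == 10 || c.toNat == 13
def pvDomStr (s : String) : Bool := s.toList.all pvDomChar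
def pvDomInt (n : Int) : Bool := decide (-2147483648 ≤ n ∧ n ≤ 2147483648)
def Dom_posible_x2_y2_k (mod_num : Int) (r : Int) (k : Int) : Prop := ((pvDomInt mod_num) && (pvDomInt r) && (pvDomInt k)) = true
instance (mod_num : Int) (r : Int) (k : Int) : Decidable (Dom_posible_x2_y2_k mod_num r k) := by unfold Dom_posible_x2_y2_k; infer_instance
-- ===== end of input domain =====

-- B replaces A's double loop over the residue list by set lookups of the
-- two possible partners of each residue (objective: faster).

-- ===== PORT A =====
def square_modulo_posible_list_k (n : Int) (k : Int) : List Int :=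
  let p := (PySem.List.pyRange 0 n 1).foldl
    (fun (p : List Int) (i : Int) =>
      if PySem.Int.mod (k * i ^ 2) n ∈ p then p
      else p ++ [PySem.Int.mod (k * i ^ 2) n]) []
  PySem.List.sorted p (fun x => x) false

def posible_x2_y2_k (mod_num : Int) (r : Int) (k : Int) : List Int × List Int :=
  let L := square_modulo_posible_list_k mod_num k
  L.foldl (fun (st : List Int × List Int) (i : Int) =>
    L.foldl (fun (st : List Int × List Int) (j : Int) =>
      if i > j then
        (if i - j = r then (st.1 ++ [i], st.2 ++ [j]) else st)
      else
        (if mod_num + i - j = r then (st.1 ++ [i], st.2 ++ [j]) else st)) st)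
    ([], [])

-- ===== PORT B =====
-- residues = {k*i*i % mod_num for i in range(mod_num)}
def pvResidues (mod_num : Int) (k : Int) : PySem.Set Int :=
  (PySem.List.pyRange 0 mod_num 1).foldl
    (fun (s : PySem.Set Int) (i : Int) => PySem.Set.add s (PySem.Int.mod (k * i * i) mod_num))
    PySem.Set.empty

def posible_x2_y2_k_alt (mod_num : Int) (r : Int) (k : Int) : List Int × List Int :=
  let residues := pvResidues mod_num k
  (PySem.List.sorted residues (fun x => x) false).foldl
    (fun (st : List Int × List Int) (i : Int) =>
      let st1 :=
        if PySem.Set.contains residues (i - r) = true ∧ i - r < i then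
          (st.1 ++ [i], st.2 ++ [i - r])
        else st
      if PySem.Set.contains residues (mod_num + i - r) = true ∧ i ≤ mod_num + i - r then
        (st1.1 ++ [i], st1.2 ++ [mod_num + i - r])
      else st1)
    ([], [])

-- ===== PRECONDITION & SPEC =====
def Spec_posible_x2_y2_k (mod_num : Int) (r : Int) (k : Int) (out : List Int × List Int) : Prop := out = posible_x2_y2_k_alt mod_num r k
instance (mod_num : Int) (r : Int) (k : Int) (out : List Int × List Int) : Decidable (Spec_posible_x2_y2_k mod_num r k out) := by unfold Spec_posible_x2_y2_k; infer_instance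

-- ===== CLAIM (what is proved, stated in full; the proofs are below) =====
def Claim_equal_posible_x2_y2_k : Prop := ∀ (mod_num : Int) (r : Int) (k : Int), Dom_posible_x2_y2_k mod_num r k → Spec_posible_x2_y2_k mod_num r k (posible_x2_y2_k mod_num r k)

-- ===== LEMMAS AND PROOFS =====

-- B's per-residue step, phrased with membership in the sorted list L
def pvTail (mod_num r : Int) (L : List Int) (i : Int) (st : List Int × List Int) : List Int × List Int :=
  let st1 := if (i - r) ∈ L ∧ i - r < i then (st.1 ++ [i], st.2 ++ [i - r]) else st
  if (mod_num + i - r) ∈ L ∧ i ≤ mod_num + i - r then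
    (st1.1 ++ [i], st1.2 ++ [mod_num + i - r])
  else st1

-- A's dedup loop is exactly building the set of residues.
lemma residues_eq (mod_num k : Int) :
    pvResidues mod_num k
      = (PySem.List.pyRange 0 mod_num 1).foldl
          (fun (p : List Int) (i : Int) =>
            if PySem.Int.mod (k * i ^ 2) mod_num ∈ p then p
            else p ++ [PySem.Int.mod (k * i ^ 2) mod_num]) [] := by
  unfold pvResidues
  have hf : (fun (s : PySem.Set Int) (i : Int) => PySem.Set.add s (PySem.Int.mod (k * i * i) mod_num))
      = (fun (p : List Int) (i : Int) =>
          if PySem.Int.mod (k * i ^ 2) mod_num ∈ p then p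
          else p ++ [PySem.Int.mod (k * i ^ 2) mod_num]) := by
    funext p i
    have h2 : k * i * i = k * i ^ 2 := by ring
    rw [PySem.Set.add_eq_ite, h2]
  rw [hf]; rfl

lemma residues_ofList (mod_num k : Int) :
    pvResidues mod_num k
      = PySem.Set.ofList ((PySem.List.pyRange 0 mod_num 1).map
          (fun i => PySem.Int.mod (k * i * i) mod_num)) := by
  rw [PySem.Set.ofList_eq_foldl, List.foldl_map]; rfl

-- the inner loop of A over a strictly increasing list picks exactly the (at most two) partners
lemma inner_loop_eq (mod_num r : Int) (hm : 0 < mod_num) (L : List Int)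
    (hL : L.Pairwise (· < ·)) (i : Int) (st : List Int × List Int) :
    L.foldl (fun (st : List Int × List Int) (j : Int) =>
      if i > j then
        (if i - j = r then (st.1 ++ [i], st.2 ++ [j]) else st)
      else
        (if mod_num + i - j = r then (st.1 ++ [i], st.2 ++ [j]) else st)) st
    = pvTail mod_num r L i st := by
  induction L generalizing st with
  | nil => simp [pvTail]
  | cons h t ih =>
    rw [List.pairwise_cons] at hL
    obtain ⟨hh, ht⟩ := hL
    rw [List.foldl_cons, ih ht]
    simp only [pvTail, List.mem_cons]
    by_cases hc1 : h = i - r ∧ i - r < i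
    · obtain ⟨he, hlt⟩ := hc1
      have hstep : (if i > h then (if i - h = r then (st.1 ++ [i], st.2 ++ [h]) else st)
          else (if mod_num + i - h = r then (st.1 ++ [i], st.2 ++ [h]) else st))
          = (st.1 ++ [i], st.2 ++ [i - r]) := by
        subst he
        rw [if_pos (by omega), if_pos (by omega)]
      have h1t : i - r ∉ t := fun hmem => absurd (hh _ hmem) (by omega)
      have hC1t : (i - r ∈ t ∧ i - r < i) ↔ False :=
        iff_false_intro (fun hx => h1t hx.1)
      have hC1c : ((i - r = h ∨ i - r ∈ t) ∧ i - r < i) ↔ True :=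
        iff_true_intro ⟨Or.inl he.symm, hlt⟩
      have hC2 : ((mod_num + i - r = h ∨ mod_num + i - r ∈ t) ∧ i ≤ mod_num + i - r)
          ↔ (mod_num + i - r ∈ t ∧ i ≤ mod_num + i - r) := by
        constructor
        · rintro ⟨(h1 | h1), h2⟩
          · omega
          · exact ⟨h1, h2⟩
        · exact fun hx => ⟨Or.inr hx.1, hx.2⟩
      simp only [hstep, hC1t, hC1c, hC2, if_true, if_false]
    · by_cases hc2 : h = mod_num + i - r ∧ i ≤ mod_num + i - r
      · obtain ⟨he, hle⟩ := hc2
        have hstep : (if i > h then (if i - h = r then (st.1 ++ [i], st.2 ++ [h]) else st)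
            else (if mod_num + i - h = r then (st.1 ++ [i], st.2 ++ [h]) else st))
            = (st.1 ++ [i], st.2 ++ [mod_num + i - r]) := by
          subst he
          rw [if_neg (by omega), if_pos (by omega)]
        have h1t : i - r ∉ t := fun hmem => absurd (hh _ hmem) (by omega)
        have h2t : mod_num + i - r ∉ t := fun hmem => absurd (hh _ hmem) (by omega)
        have hC1t : (i - r ∈ t ∧ i - r < i) ↔ False :=
          iff_false_intro (fun hx => h1t hx.1)
        have hC2t : (mod_num + i - r ∈ t ∧ i ≤ mod_num + i - r) ↔ False :=
          iff_false_intro (fun hx => h2t hx.1)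
        have hC1c : ((i - r = h ∨ i - r ∈ t) ∧ i - r < i) ↔ False := by
          constructor
          · rintro ⟨(h1 | h1), h2⟩
            · omega
            · exact h1t h1
          · exact False.elim
        have hC2c : ((mod_num + i - r = h ∨ mod_num + i - r ∈ t) ∧ i ≤ mod_num + i - r)
            ↔ True := iff_true_intro ⟨Or.inl he.symm, hle⟩
        simp only [hstep, hC1t, hC2t, hC1c, hC2c, if_true, if_false]
      · have hstep : (if i > h then (if i - h = r then (st.1 ++ [i], st.2 ++ [h]) else st)
            else (if mod_num + i - h = r then (st.1 ++ [i], st.2 ++ [h]) else st)) = st := by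
          by_cases hgt : i > h
          · rw [if_pos hgt, if_neg (fun hr => hc1 ⟨by omega, by omega⟩)]
          · rw [if_neg hgt, if_neg (fun hr => hc2 ⟨by omega, by omega⟩)]
        have hC1 : ((i - r = h ∨ i - r ∈ t) ∧ i - r < i) ↔ (i - r ∈ t ∧ i - r < i) := by
          constructor
          · rintro ⟨(h1 | h1), h2⟩
            · exact absurd ⟨h1.symm, h2⟩ hc1
            · exact ⟨h1, h2⟩
          · exact fun hx => ⟨Or.inr hx.1, hx.2⟩
        have hC2 : ((mod_num + i - r = h ∨ mod_num + i - r ∈ t) ∧ i ≤ mod_num + i - r)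
            ↔ (mod_num + i - r ∈ t ∧ i ≤ mod_num + i - r) := by
          constructor
          · rintro ⟨(h1 | h1), h2⟩
            · exact absurd ⟨h1.symm, h2⟩ hc2
            · exact ⟨h1, h2⟩
          · exact fun hx => ⟨Or.inr hx.1, hx.2⟩
        simp only [hstep, hC1, hC2]

-- ===== VERDICT (by name: the statement is the Claim_ definition above) =====
theorem posible_x2_y2_k_spec : Claim_equal_posible_x2_y2_k := by
  intro mod_num r k _
  unfold Spec_posible_x2_y2_k
  by_cases hm : mod_num ≤ 0
  · unfold posible_x2_y2_k posible_x2_y2_k_alt square_modulo_posible_list_k pvResidues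
    rw [PySem.List.pyRange_one_eq_nil (by omega)]
    rfl
  · have hm' : 0 < mod_num := by omega
    have hLp : (PySem.List.sorted (pvResidues mod_num k) (fun x => x) false).Pairwise (· < ·) := by
      rw [residues_ofList]
      exact PySem.List.sorted_ofList_pairwise_lt _
    have hmem : ∀ x : Int,
        (x ∈ PySem.List.sorted (pvResidues mod_num k) (fun x => x) false)
          ↔ (PySem.Set.contains (pvResidues mod_num k) x = true) := fun x => by
      rw [PySem.Set.contains_iff, PySem.List.mem_sorted]
    have hfun : (fun (st : List Int × List Int) (i : Int) =>
        (PySem.List.sorted (pvResidues mod_num k) (fun x => x) false).foldl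
          (fun (st : List Int × List Int) (j : Int) =>
            if i > j then
              (if i - j = r then (st.1 ++ [i], st.2 ++ [j]) else st)
            else
              (if mod_num + i - j = r then (st.1 ++ [i], st.2 ++ [j]) else st)) st)
        = (fun (st : List Int × List Int) (i : Int) =>
            let st1 :=
              if PySem.Set.contains (pvResidues mod_num k) (i - r) = true ∧ i - r < i then
                (st.1 ++ [i], st.2 ++ [i - r])
              else st
            if PySem.Set.contains (pvResidues mod_num k) (mod_num + i - r) = true ∧
                i ≤ mod_num + i - r then
              (st1.1 ++ [i], st1.2 ++ [mod_num + i - r])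
            else st1) := by
      funext st i
      rw [inner_loop_eq mod_num r hm' _ hLp i st]
      simp only [pvTail, hmem]
    unfold posible_x2_y2_k posible_x2_y2_k_alt square_modulo_posible_list_k
    rw [← residues_eq]
    exact congrArg
      (fun f => List.foldl f (([], []) : List Int × List Int)
        (PySem.List.sorted (pvResidues mod_num k) (fun x => x) false)) hfun
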